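-- pv_equiv track=rewrite | github.com/richardpanda/advent-of-code-2018 | day04/guards.py | generate_guard_to_shift
-- ===== SOURCE A (Python) =====
-- from collections import defaultdict
--
-- NUM_MINUTES = 60
--
-- def generate_guard_to_shift(logs):
--     logs = sorted(logs)
--
--     begin_idxs = [idx for idx, log in enumerate(logs) if "begins" in log] + [len(logs)]
--     shifts = [
--         logs[begin_idxs[i] : begin_idxs[i + 1]] for i in range(len(begin_idxs) - 1)
--     ]
--
--     guard_to_shift = defaultdict(lambda: [0] * NUM_MINUTES)
--     for shift in shifts:
--         guard = int(shift[0].split()[3][1:])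
--         for i in range(1, len(shift), 2):
--             start, end = map(
--                 lambda s: int(s.split(":")[1][:2]), [shift[i], shift[i + 1]]
--             )
--             for j in range(start, end):
--                 guard_to_shift[guard][j] += 1
--
--     return guard_to_shift
-- ===== SOURCE B (Python) =====
-- from collections import defaultdict
--
-- NUM_MINUTES = 60
--
--
-- def generate_guard_to_shift(logs):
--     guard_to_shift = defaultdict(lambda: [0] * NUM_MINUTES)
--     guard = None
--     sleep_start = None
--     for log in sorted(logs):
--         if "begins" in log:
--             guard = int(log.split()[3][1:])
--             sleep_start = None
--         elif guard is not None:
--             minute = int(log.split(":")[1][:2])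
--             if sleep_start is None:
--                 sleep_start = minute
--             else:
--                 for j in range(sleep_start, minute):
--                     guard_to_shift[guard][j] += 1
--                 sleep_start = None
--     return guard_to_shift
-- ===== Notes on version B (the rewrite author's own statement) =====
-- stated objective: simpler
-- what changed: A builds a begin-index list, slices the sorted log into shift sublists and loops over index pairs inside each slice; B makes one linear pass over the sorted log with a current-guard and sleep-start state machine, so the begin_idxs/shifts construction disappears.
import Mathlib
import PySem

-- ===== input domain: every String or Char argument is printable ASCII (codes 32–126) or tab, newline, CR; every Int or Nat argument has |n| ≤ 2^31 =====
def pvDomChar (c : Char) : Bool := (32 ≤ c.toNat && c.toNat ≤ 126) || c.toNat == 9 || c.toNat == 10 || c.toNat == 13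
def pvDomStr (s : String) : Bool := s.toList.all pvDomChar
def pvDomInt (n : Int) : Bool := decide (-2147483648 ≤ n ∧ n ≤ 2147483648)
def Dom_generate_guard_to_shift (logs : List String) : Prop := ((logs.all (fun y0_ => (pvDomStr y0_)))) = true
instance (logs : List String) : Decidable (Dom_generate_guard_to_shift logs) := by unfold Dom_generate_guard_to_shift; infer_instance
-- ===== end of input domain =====

-- B replaces A's begin-index/slice shift construction by a single linear pass over the sorted
-- log with a current-guard / sleep-start state machine (objective: simpler decomposition).

-- ===== PORT A =====
-- shared parsing helpers (these exact expressions occur in both Pythons)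
def pvBegins (s : String) : Bool := PySem.Str.isIn "begins" s          -- "begins" in log
def pvGuardOf (s : String) : Option Int :=                              -- int(log.split()[3][1:]); none = raise
  match PySem.List.pyGet? (PySem.Str.split₀ s) 3 with
  | some t => PySem.Int.ofStr? (PySem.Str.slice t (some 1) none)
  | none => none
def pvMinuteOf (s : String) : Option Int :=                             -- int(log.split(":")[1][:2]); none = raise
  match PySem.List.pyGet? ((PySem.Str.split? s ":").getD []) 1 with     -- sep ":" ≠ "", so split? is some
  | some t => PySem.Int.ofStr? (PySem.Str.slice t none (some 2))
  | none => none
-- guard_to_shift[guard][j] += 1 on the defaultdict(lambda: [0] * NUM_MINUTES)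
-- (pySetD/pyGetD are the total forms; the raising out-of-range indices are excluded by Pre_)
def pvBump (d : PySem.Dict Int (List Int)) (g j : Int) : PySem.Dict Int (List Int) :=
  d.modify g (List.replicate 60 0) (fun row => PySem.List.pySetD row j (PySem.List.pyGetD row j 0 + 1))

def pvIdxs (L : List String) : List Int :=                              -- begin_idxs
  (((PySem.List.enumerate L).filter (fun p => pvBegins p.2)).map (fun p => p.1)) ++ [(L.length : Int)]
def pvShiftsOf (L : List String) : List (List String) :=                -- shifts
  (PySem.List.pyRange 0 (((pvIdxs L).length : Int) - 1) 1).map (fun i =>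
    PySem.List.slice L (some (PySem.List.pyGetD (pvIdxs L) i 0)) (some (PySem.List.pyGetD (pvIdxs L) (i + 1) 0)))
def pvInner (d : PySem.Dict Int (List Int)) (shift : List String) : PySem.Dict Int (List Int) :=
  let guard := (pvGuardOf (PySem.List.pyGetD shift 0 "")).getD 0        -- .getD 0 covers only raising paths excluded by Pre_
  (PySem.List.pyRange 1 (shift.length : Int) 2).foldl (fun d i =>
    let start := (pvMinuteOf (PySem.List.pyGetD shift i "")).getD 0
    let stop := (pvMinuteOf (PySem.List.pyGetD shift (i + 1) "")).getD 0
    (PySem.List.pyRange start stop 1).foldl (fun d j => pvBump d guard j) d) d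

def generate_guard_to_shift (logs : List String) : List (Int × List Int) :=
  ((pvShiftsOf (PySem.List.sorted logs (fun x => x.toList) false)).foldl pvInner PySem.Dict.empty).items

-- ===== PORT B =====
def pvStep (st : PySem.Dict Int (List Int) × Option Int × Option Int) (log : String) :
    PySem.Dict Int (List Int) × Option Int × Option Int :=
  if pvBegins log then (st.1, some ((pvGuardOf log).getD 0), none)
  else
    match st.2.1 with
    | none => st
    | some g =>
      let minute := (pvMinuteOf log).getD 0
      match st.2.2 with
      | none => (st.1, some g, some minute)
      | some s => ((PySem.List.pyRange s minute 1).foldl (fun d j => pvBump d g j) st.1, some g, none)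

def generate_guard_to_shift_alt (logs : List String) : List (Int × List Int) :=
  ((PySem.List.sorted logs (fun x => x.toList) false).foldl pvStep (PySem.Dict.empty, none, none)).1.items

-- ===== PRECONDITION & SPEC =====
def pvNotBegins (s : String) : Bool := !pvBegins s
-- the shifts of the (sorted) log: maximal blocks headed by a "begins" line (fuel = list length)
def pvGroupsAux : Nat → List String → List (List String)
  | _, [] => []
  | 0, _ :: _ => []
  | n + 1, g :: rest => (g :: rest.takeWhile pvNotBegins) :: pvGroupsAux n (rest.dropWhile pvNotBegins)
def pvGroups (l : List String) : List (List String) := pvGroupsAux l.length l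
-- a sleep/wake pair is fine iff both minutes parse and every visited index j of range(start, end)
-- is a valid (possibly negative, Python-wrapping) index into the 60-entry row
def pvPairOK (s e : String) : Bool :=
  match pvMinuteOf s, pvMinuteOf e with
  | some a, some b => decide (b ≤ a) || (decide (-60 ≤ a) && decide (b ≤ 60))
  | _, _ => false
def pvBodyOK : List String → Bool
  | [] => true
  | [_] => false
  | s :: e :: r => pvPairOK s e && pvBodyOK r
def pvShiftOK : List String → Bool
  | [] => true
  | g :: body => (pvGuardOf g).isSome && pvBodyOK body
-- Pre_ = exactly the inputs where A returns normally: in every shift of the sorted log the guard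
-- line parses, the sleep/wake lines pair up evenly, and every pair parses with in-range minutes
def Pre_generate_guard_to_shift (logs : List String) : Prop :=
  (pvGroups ((PySem.List.sorted logs (fun x => x.toList) false).dropWhile pvNotBegins)).all pvShiftOK = true
instance (logs : List String) : Decidable (Pre_generate_guard_to_shift logs) := by
  unfold Pre_generate_guard_to_shift; infer_instance
def pvWitness_generate_guard_to_shift : List String :=
  ["[1518-11-01 00:00] Guard #10 begins shift",
   "[1518-11-01 00:05] falls asleep",
   "[1518-11-01 00:30] wakes up"]
def Spec_generate_guard_to_shift (logs : List String) (out : List (Int × List Int)) : Prop := out = generate_guard_to_shift_alt logs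
instance (logs : List String) (out : List (Int × List Int)) : Decidable (Spec_generate_guard_to_shift logs out) := by unfold Spec_generate_guard_to_shift; infer_instance

-- ===== CLAIM (what is proved, stated in full; the proofs are below) =====
def Claim_equal_generate_guard_to_shift : Prop := ∀ (logs : List String), Dom_generate_guard_to_shift logs → Pre_generate_guard_to_shift logs → Spec_generate_guard_to_shift logs (generate_guard_to_shift logs)

-- ===== LEMMAS AND PROOFS =====

-- structural A-side semantics of one shift (guard line, then alternating sleep/wake pairs)
def pvRangeBump (d : PySem.Dict Int (List Int)) (g a b : Int) : PySem.Dict Int (List Int) :=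
  (PySem.List.pyRange a b 1).foldl (fun d j => pvBump d g j) d
def pvPairRun (g : Int) : List String → PySem.Dict Int (List Int) → PySem.Dict Int (List Int)
  | s :: e :: r, d => pvPairRun g r (pvRangeBump d g ((pvMinuteOf s).getD 0) ((pvMinuteOf e).getD 0))
  | _, d => d
def pvShiftRun (d : PySem.Dict Int (List Int)) (sh : List String) : PySem.Dict Int (List Int) :=
  match sh with
  | [] => d
  | g :: body => pvPairRun ((pvGuardOf g).getD 0) body d

theorem pv_foldl_congr {α β : Type} (l : List β) (f g : α → β → α) (d : α)
    (h : ∀ x ∈ l, ∀ acc, f acc x = g acc x) : l.foldl f d = l.foldl g d := by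
  induction l generalizing d with
  | nil => rfl
  | cons x xs ih =>
    simp only [List.foldl_cons]
    rw [h x (by simp) d]
    exact ih _ (fun y hy acc => h y (by simp [hy]) acc)

-- pvGroups: fuel invariance and unfolding
theorem pv_groupsAux_nil (n : Nat) : pvGroupsAux n [] = [] := by cases n <;> rfl

theorem pv_groupsAux_eq : ∀ (n : Nat) (l : List String), l.length ≤ n →
    pvGroupsAux n l = pvGroupsAux l.length l := by
  intro n
  induction n using Nat.strong_induction_on with
  | _ n ih =>
    intro l hl
    match l with
    | [] => rw [pv_groupsAux_nil, pv_groupsAux_nil]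
    | g :: rest =>
      cases n with
      | zero => simp at hl
      | succ n =>
        show (g :: rest.takeWhile pvNotBegins) :: pvGroupsAux n (rest.dropWhile pvNotBegins)
          = (g :: rest.takeWhile pvNotBegins) :: pvGroupsAux rest.length (rest.dropWhile pvNotBegins)
        congr 1
        have hdw := List.length_dropWhile_le pvNotBegins rest
        have hl' : rest.length ≤ n := by simp at hl; omega
        rw [ih n (by omega) _ (by omega), ih rest.length (by omega) _ hdw]

theorem pv_groups_nil : pvGroups [] = [] := rfl
theorem pv_groups_cons (g : String) (rest : List String) :
    pvGroups (g :: rest) = (g :: rest.takeWhile pvNotBegins) :: pvGroups (rest.dropWhile pvNotBegins) := by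
  show pvGroupsAux (rest.length + 1) (g :: rest) = _
  simp only [pvGroupsAux]
  rw [pv_groupsAux_eq rest.length _ (List.length_dropWhile_le pvNotBegins rest)]
  rfl

theorem pv_groups_flatten : ∀ (n : Nat) (R : List String), R.length ≤ n →
    (pvGroups R).flatten = R := by
  intro n
  induction n with
  | zero =>
    intro R hR
    have hR0 : R = [] := List.length_eq_zero_iff.mp (by omega)
    subst hR0; rfl
  | succ n ih =>
    intro R hR
    match R with
    | [] => rfl
    | g :: rest =>
      rw [pv_groups_cons]
      simp only [List.flatten_cons, List.cons_append]
      rw [ih _ (by have := List.length_dropWhile_le pvNotBegins rest; simp at hR; omega)]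
      rw [List.takeWhile_append_dropWhile]

theorem pv_dropWhile_head : ∀ (l : List String) (g : String) (t : List String),
    l.dropWhile pvNotBegins = g :: t → pvBegins g = true := by
  intro l
  induction l with
  | nil => intro g t h; simp at h
  | cons x xs ih =>
    intro g t h
    by_cases hx : pvNotBegins x = true
    · rw [List.dropWhile_cons_of_pos hx] at h; exact ih g t h
    · rw [List.dropWhile_cons_of_neg hx] at h
      cases h
      simp [pvNotBegins] at hx
      exact hx

theorem pv_groups_shape : ∀ (n : Nat) (X : List String), X.length ≤ n →
    ∀ sh ∈ pvGroups (X.dropWhile pvNotBegins),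
      ∃ g body, sh = g :: body ∧ pvBegins g = true ∧ ∀ s ∈ body, pvBegins s = false := by
  intro n
  induction n with
  | zero =>
    intro X hX
    have hX0 : X = [] := List.length_eq_zero_iff.mp (by omega)
    subst hX0
    intro sh hsh; simp [pv_groups_nil] at hsh
  | succ n ih =>
    intro X hX sh hsh
    cases hdw : X.dropWhile pvNotBegins with
    | nil => rw [hdw] at hsh; simp [pv_groups_nil] at hsh
    | cons g rest =>
      rw [hdw, pv_groups_cons] at hsh
      rcases List.mem_cons.mp hsh with h | h
      · refine ⟨g, rest.takeWhile pvNotBegins, h, pv_dropWhile_head X g rest hdw, ?_⟩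
        intro s hs
        have := List.mem_takeWhile_imp hs
        simpa [pvNotBegins] using this
      · have hlen : rest.length ≤ n := by
          have h1 : (X.dropWhile pvNotBegins).length ≤ X.length := List.length_dropWhile_le _ _
          rw [hdw] at h1; simp at h1; omega
        exact ih rest hlen sh h

theorem pv_bodyOK_even : ∀ (body : List String), pvBodyOK body = true → body.length % 2 = 0 := by
  intro body
  induction body using pvBodyOK.induct with
  | case1 => intro _; rfl
  | case2 x => intro h; simp [pvBodyOK] at h
  | case3 s e r ih =>
    intro h
    simp only [pvBodyOK, Bool.and_eq_true] at h
    have := ih h.2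
    simp only [List.length_cons]
    omega

-- ===== the A side: index/slice bookkeeping =====

theorem pv_enum_shift : ∀ (L : List String) (s : Int),
    PySem.List.enumerate L (s + 1) = (PySem.List.enumerate L s).map (fun p => (p.1 + 1, p.2)) := by
  intro L
  induction L with
  | nil => intro s; simp [PySem.List.enumerate_nil]
  | cons x xs ih =>
    intro s
    rw [PySem.List.enumerate_cons, PySem.List.enumerate_cons]
    simp only [List.map_cons]
    rw [show s + 1 + 1 = (s + 1) + 1 by ring, ih (s + 1)]

theorem pv_idxs_cons (x : String) (L : List String) :
    pvIdxs (x :: L) = (if pvBegins x then [(0 : Int)] else []) ++ (pvIdxs L).map (· + 1) := by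
  unfold pvIdxs
  rw [PySem.List.enumerate_cons, pv_enum_shift]
  rw [List.filter_cons]
  have hfil : ((fun (p : Int × String) => pvBegins p.2) ∘ (fun (p : Int × String) => (p.1 + 1, p.2)))
      = (fun (p : Int × String) => pvBegins p.2) := by funext p; rfl
  have hf : ((fun (p : Int × String) => p.1) ∘ (fun (p : Int × String) => (p.1 + 1, p.2)))
      = ((fun (y : Int) => y + 1) ∘ (fun (p : Int × String) => p.1)) := by funext p; rfl
  by_cases hx : pvBegins x = true
  · rw [if_pos (show pvBegins (((0 : Int), x)).2 = true from hx), if_pos hx]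
    rw [List.map_cons, List.singleton_append, List.map_append, List.map_map]
    refine List.cons_eq_cons.mpr ⟨rfl, ?_⟩
    congr 1
    rw [List.filter_map, List.map_map, hfil, hf]
  · rw [if_neg (show ¬ pvBegins (((0 : Int), x)).2 = true from hx), if_neg hx]
    rw [List.nil_append, List.map_append, List.map_map]
    congr 1
    rw [List.filter_map, List.map_map, hfil, hf]

theorem pv_idxs_ne_nil (L : List String) : pvIdxs L ≠ [] := by
  unfold pvIdxs; simp

theorem pv_idxs_nonneg : ∀ (L : List String), ∀ y ∈ pvIdxs L, 0 ≤ y := by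
  intro L
  induction L with
  | nil => intro y hy; simp [pvIdxs, PySem.List.enumerate_nil] at hy; omega
  | cons x xs ih =>
    intro y hy
    rw [pv_idxs_cons] at hy
    rcases List.mem_append.mp hy with h | h
    · split at h <;> simp at h; omega
    · rcases List.mem_map.mp h with ⟨z, hz, rfl⟩
      have := ih z hz; omega

theorem pv_idxs_head : ∀ (L : List String),
    (pvIdxs L).headD 0 = ((L.takeWhile pvNotBegins).length : Int) := by
  intro L
  induction L with
  | nil => rfl
  | cons x xs ih =>
    rw [pv_idxs_cons]
    by_cases hx : pvBegins x = true
    · rw [if_pos hx]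
      rw [List.takeWhile_cons_of_neg (by simp [pvNotBegins, hx])]
      rfl
    · rw [if_neg hx]
      rw [List.takeWhile_cons_of_pos (by simp [pvNotBegins]; simpa using hx)]
      rw [List.nil_append]
      obtain ⟨y, ys, hys⟩ := List.exists_cons_of_ne_nil (pv_idxs_ne_nil xs)
      rw [hys] at ih ⊢
      simp only [List.map_cons, List.headD_cons, List.length_cons] at ih ⊢
      push_cast
      omega

-- A's shifts as a List.range map with List.getD indexing
theorem pv_shifts_eq_range (L : List String) :
    pvShiftsOf L = (List.range ((pvIdxs L).length - 1)).map (fun k =>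
      PySem.List.slice L (some ((pvIdxs L).getD k 0)) (some ((pvIdxs L).getD (k + 1) 0))) := by
  unfold pvShiftsOf
  rw [PySem.List.pyRange_one]
  rw [List.map_map]
  have hlen : (((pvIdxs L).length : Int) - 1 - 0).toNat = (pvIdxs L).length - 1 := by omega
  rw [hlen]
  apply List.map_congr_left
  intro k hk
  simp only [Function.comp]
  have h1 : (0 : Int) + (k : Int) = ((k : Nat) : Int) := by omega
  rw [h1]
  rw [PySem.List.pyGetD_natCast]
  have h2 : ((k : Nat) : Int) + 1 = (((k + 1 : Nat)) : Int) := by push_cast; ring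
  rw [h2, PySem.List.pyGetD_natCast]

theorem pv_getD_map_add_one (J : List Int) (k : Nat) (hk : k < J.length) :
    (J.map (· + 1)).getD k 0 = J.getD k 0 + 1 := by
  rw [List.getD_eq_getElem?_getD, List.getD_eq_getElem?_getD]
  rw [List.getElem?_map]
  rw [List.getElem?_eq_getElem hk]
  rfl

theorem pv_slice_shift (x : String) (L : List String) (a b : Int) (ha : 0 ≤ a) (hb : 0 ≤ b) :
    PySem.List.slice (x :: L) (some (a + 1)) (some (b + 1)) = PySem.List.slice L (some a) (some b) := by
  rw [PySem.List.slice_toNat (x :: L) (show (0 : Int) ≤ a + 1 by omega) (show (0 : Int) ≤ b + 1 by omega)]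
  rw [PySem.List.slice_toNat L ha hb]
  have h1 : (a + 1).toNat = a.toNat + 1 := by omega
  have h2 : (b + 1).toNat - (a + 1).toNat = b.toNat - a.toNat := by omega
  rw [h2, h1]
  rfl

theorem pv_getD_mem_nonneg (L : List String) (k : Nat) (hk : k < (pvIdxs L).length) :
    0 ≤ (pvIdxs L).getD k 0 := by
  have : (pvIdxs L).getD k 0 ∈ pvIdxs L := by
    rw [List.getD_eq_getElem _ _ hk]
    exact List.getElem_mem _
  exact pv_idxs_nonneg L _ this

theorem pv_shifts_cons_not (x : String) (L : List String) (hx : pvBegins x = false) :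
    pvShiftsOf (x :: L) = pvShiftsOf L := by
  rw [pv_shifts_eq_range, pv_shifts_eq_range]
  rw [pv_idxs_cons]
  rw [if_neg (by simp [hx]), List.nil_append, List.length_map]
  apply List.map_congr_left
  intro k hk
  have hk' : k < (pvIdxs L).length - 1 := List.mem_range.mp hk
  have hlen : 1 ≤ (pvIdxs L).length := by
    cases h : pvIdxs L with
    | nil => exact absurd h (pv_idxs_ne_nil L)
    | cons a l => simp
  rw [pv_getD_map_add_one _ _ (by omega), pv_getD_map_add_one _ _ (by omega)]
  exact pv_slice_shift x L _ _ (pv_getD_mem_nonneg L k (by omega)) (pv_getD_mem_nonneg L (k + 1) (by omega))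

theorem pv_shifts_cons_beg (x : String) (L : List String) (hx : pvBegins x = true) :
    pvShiftsOf (x :: L) = (x :: L.takeWhile pvNotBegins) :: pvShiftsOf L := by
  rw [pv_shifts_eq_range, pv_shifts_eq_range]
  rw [pv_idxs_cons]
  rw [if_pos hx, List.singleton_append]
  simp only [List.length_cons, List.length_map]
  have hlen : 1 ≤ (pvIdxs L).length := by
    cases h : pvIdxs L with
    | nil => exact absurd h (pv_idxs_ne_nil L)
    | cons a l => simp
  have hrange : (pvIdxs L).length + 1 - 1 = ((pvIdxs L).length - 1) + 1 := by omega
  rw [hrange, List.range_succ_eq_map]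
  rw [List.map_cons, List.map_map]
  refine List.cons_eq_cons.mpr ⟨?_, ?_⟩
  · -- head slice: logs[0 : first_begin_idx + 1] = x :: takeWhile pvNotBegins L
    simp only [List.getD_cons_succ, List.getD_cons_zero]
    rw [pv_getD_map_add_one _ _ (by omega)]
    have hhead : (pvIdxs L).getD 0 0 = ((L.takeWhile pvNotBegins).length : Int) := by
      rw [← pv_idxs_head L]
      obtain ⟨y, ys, hys⟩ := List.exists_cons_of_ne_nil (pv_idxs_ne_nil L)
      rw [hys]; rfl
    rw [hhead]
    rw [PySem.List.slice_zero_start]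
    have hc : ((L.takeWhile pvNotBegins).length : Int) + 1 = (((L.takeWhile pvNotBegins).length + 1 : Nat) : Int) := by push_cast; ring
    rw [hc, PySem.List.slice_to_natCast]
    rw [List.take_succ_cons]
    congr 1
    exact (List.prefix_iff_eq_take.mp (List.takeWhile_prefix _)).symm
  · apply List.map_congr_left
    intro k hk
    have hk' : k < (pvIdxs L).length - 1 := List.mem_range.mp hk
    simp only [Function.comp, Nat.succ_eq_add_one]
    simp only [List.getD_cons_succ]
    rw [pv_getD_map_add_one _ _ (by omega), pv_getD_map_add_one _ _ (by omega)]
    exact pv_slice_shift x L _ _ (pv_getD_mem_nonneg L k (by omega)) (pv_getD_mem_nonneg L (k + 1) (by omega))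

theorem pv_shifts_groups : ∀ (L : List String),
    pvShiftsOf L = pvGroups (L.dropWhile pvNotBegins) := by
  intro L
  induction L with
  | nil => rfl
  | cons x xs ih =>
    by_cases hx : pvBegins x = true
    · rw [pv_shifts_cons_beg x xs hx]
      rw [List.dropWhile_cons_of_neg (by simp [pvNotBegins, hx])]
      rw [pv_groups_cons]
      rw [ih]
    · have hx' : pvBegins x = false := by simpa using hx
      rw [pv_shifts_cons_not x xs hx']
      rw [List.dropWhile_cons_of_pos (by simp [pvNotBegins, hx'])]
      exact ih

-- ===== the A side: the inner pair loop =====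

theorem pv_pyRange_two (m : Nat) :
    PySem.List.pyRange 1 (1 + 2 * (m : Int)) 2 = (List.range m).map (fun k => ((2 * k + 1 : Nat) : Int)) := by
  rw [PySem.List.pyRange_of_pos _ _ (by norm_num)]
  have hc : (if (1 : Int) < 1 + 2 * (m : Int) then ((1 + 2 * (m : Int) - 1 + 2 - 1) / 2).toNat else 0) = m := by
    split_ifs with h
    · omega
    · omega
  rw [hc]
  apply List.map_congr_left
  intro k hk
  push_cast
  ring

theorem pv_fold_pairs (G : Int) : ∀ (m : Nat) (body : List String) (d : PySem.Dict Int (List Int)),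
    body.length = 2 * m →
    (List.range m).foldl (fun d k =>
      pvRangeBump d G ((pvMinuteOf (body.getD (2 * k) "")).getD 0)
        ((pvMinuteOf (body.getD (2 * k + 1) "")).getD 0)) d = pvPairRun G body d := by
  intro m
  induction m with
  | zero =>
    intro body d hlen
    have h0 : body = [] := List.length_eq_zero_iff.mp (by omega)
    subst h0
    rfl
  | succ n ih =>
    intro body d hlen
    match body with
    | s :: e :: r =>
      rw [List.range_succ_eq_map]
      simp only [List.foldl_cons, List.foldl_map]
      have hstep : ∀ (d : PySem.Dict Int (List Int)) (k : Nat), k ∈ List.range n →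
          pvRangeBump d G ((pvMinuteOf ((s :: e :: r).getD (2 * (k + 1)) "")).getD 0)
            ((pvMinuteOf ((s :: e :: r).getD (2 * (k + 1) + 1) "")).getD 0)
          = pvRangeBump d G ((pvMinuteOf (r.getD (2 * k) "")).getD 0)
            ((pvMinuteOf (r.getD (2 * k + 1) "")).getD 0) := by
        intro d k _
        have e1 : 2 * (k + 1) = (2 * k) + 1 + 1 := by omega
        rw [e1]
        simp only [List.getD_cons_succ]
      rw [pv_foldl_congr (List.range n) _ _ _ (fun k hk acc => hstep acc k hk)]
      show (List.range n).foldl _ _ = pvPairRun G (s :: e :: r) d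
      rw [show pvPairRun G (s :: e :: r) d =
        pvPairRun G r (pvRangeBump d G ((pvMinuteOf s).getD 0) ((pvMinuteOf e).getD 0)) from rfl]
      have hse : pvRangeBump d G ((pvMinuteOf ((s :: e :: r).getD (2 * 0) "")).getD 0)
          ((pvMinuteOf ((s :: e :: r).getD (2 * 0 + 1) "")).getD 0)
          = pvRangeBump d G ((pvMinuteOf s).getD 0) ((pvMinuteOf e).getD 0) := rfl
      rw [hse]
      exact ih r _ (by simp at hlen; omega)

theorem pv_inner_eq (m : Nat) (body : List String) (hlen : body.length = 2 * m)
    (g0 : String) (d : PySem.Dict Int (List Int)) :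
    pvInner d (g0 :: body) = pvShiftRun d (g0 :: body) := by
  unfold pvInner pvShiftRun
  rw [PySem.List.pyGetD_zero_cons]
  have hL : (((g0 :: body).length : Int)) = 1 + 2 * (m : Int) := by
    simp [hlen]; ring
  rw [hL, pv_pyRange_two]
  rw [List.foldl_map]
  set G := (pvGuardOf g0).getD 0 with hG
  have hstep : ∀ (d : PySem.Dict Int (List Int)) (k : Nat), k ∈ List.range m →
      (PySem.List.pyRange ((pvMinuteOf (PySem.List.pyGetD (g0 :: body) ((2 * k + 1 : Nat) : Int) "")).getD 0)
        ((pvMinuteOf (PySem.List.pyGetD (g0 :: body) (((2 * k + 1 : Nat) : Int) + 1) "")).getD 0) 1).foldl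
          (fun d j => pvBump d G j) d
      = pvRangeBump d G ((pvMinuteOf (body.getD (2 * k) "")).getD 0)
          ((pvMinuteOf (body.getD (2 * k + 1) "")).getD 0) := by
    intro d k _
    have e2 : (((2 * k + 1 : Nat) : Int) + 1) = (((2 * k + 2 : Nat)) : Int) := by push_cast; ring
    rw [e2]
    rw [PySem.List.pyGetD_natCast, PySem.List.pyGetD_natCast]
    have g1 : (g0 :: body).getD (2 * k + 1) "" = body.getD (2 * k) "" := by
      simp only [List.getD_cons_succ]
    have g2 : (g0 :: body).getD (2 * k + 2) "" = body.getD (2 * k + 1) "" := by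
      have h22 : 2 * k + 2 = (2 * k + 1) + 1 := by omega
      rw [h22]; simp only [List.getD_cons_succ]
    rw [g1, g2]
    rfl
  rw [pv_foldl_congr (List.range m) _ _ _ (fun k hk acc => hstep acc k hk)]
  exact pv_fold_pairs G m body d hlen

-- ===== the B side =====

theorem pv_b_prefix : ∀ (P : List String) (d : PySem.Dict Int (List Int)) (sl : Option Int),
    (∀ s ∈ P, pvBegins s = false) → P.foldl pvStep (d, none, sl) = (d, none, sl) := by
  intro P
  induction P with
  | nil => intro d sl _; rfl
  | cons x xs ih =>
    intro d sl h
    have hx : pvBegins x = false := h x (by simp)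
    simp only [List.foldl_cons]
    have hstep : pvStep (d, none, sl) x = (d, none, sl) := by
      unfold pvStep
      rw [if_neg (by simp [hx])]
    rw [hstep]
    exact ih d sl (fun s hs => h s (by simp [hs]))

theorem pv_b_group : ∀ (m : Nat) (body : List String), body.length = 2 * m →
    (∀ s ∈ body, pvBegins s = false) →
    ∀ (d : PySem.Dict Int (List Int)) (g : Int),
      body.foldl pvStep (d, some g, none) = (pvPairRun g body d, some g, none) := by
  intro m
  induction m with
  | zero =>
    intro body hlen _ d g
    have h0 : body = [] := List.length_eq_zero_iff.mp (by omega)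
    subst h0
    rfl
  | succ n ih =>
    intro body hlen hnb d g
    match body with
    | s :: e :: r =>
      have hs : pvBegins s = false := hnb s (by simp)
      have he : pvBegins e = false := hnb e (by simp)
      simp only [List.foldl_cons]
      have step1 : pvStep (d, some g, none) s = (d, some g, some ((pvMinuteOf s).getD 0)) := by
        unfold pvStep
        rw [if_neg (by simp [hs])]
      have step2 : pvStep (d, some g, some ((pvMinuteOf s).getD 0)) e =
          (pvRangeBump d g ((pvMinuteOf s).getD 0) ((pvMinuteOf e).getD 0), some g, none) := by
        unfold pvStep
        rw [if_neg (by simp [he])]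
        rfl
      rw [step1, step2]
      rw [ih r (by simp at hlen; omega) (fun x hx => hnb x (by simp [hx])) _ g]
      rfl

theorem pv_b_groups : ∀ (gs : List (List String)) (d : PySem.Dict Int (List Int)) (g0 : Option Int),
    (∀ sh ∈ gs, ∃ g body, sh = g :: body ∧ pvBegins g = true ∧
      (∀ s ∈ body, pvBegins s = false) ∧ body.length % 2 = 0) →
    ∃ g1, (gs.flatten).foldl pvStep (d, g0, none) = (gs.foldl pvShiftRun d, g1, none) := by
  intro gs
  induction gs with
  | nil => intro d g0 _; exact ⟨g0, rfl⟩
  | cons sh rest ih =>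
    intro d g0 h
    obtain ⟨g, body, rfl, hbeg, hnb, heven⟩ := h sh (by simp)
    simp only [List.flatten_cons, List.foldl_append, List.foldl_cons]
    have step0 : pvStep (d, g0, none) g = (d, some ((pvGuardOf g).getD 0), none) := by
      unfold pvStep
      rw [if_pos hbeg]
    rw [step0]
    rw [pv_b_group (body.length / 2) body (by omega) hnb d _]
    have hsr : pvPairRun ((pvGuardOf g).getD 0) body d = pvShiftRun d (g :: body) := rfl
    rw [hsr]
    exact ih _ _ (fun x hx => h x (by simp [hx]))

-- ===== assembly =====

theorem pv_main : ∀ (logs : List String), Pre_generate_guard_to_shift logs →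
    generate_guard_to_shift logs = generate_guard_to_shift_alt logs := by
  intro logs hpre
  unfold generate_guard_to_shift generate_guard_to_shift_alt
  set L := PySem.List.sorted logs (fun x => x.toList) false with hLdef
  unfold Pre_generate_guard_to_shift at hpre
  rw [← hLdef] at hpre
  rw [List.all_eq_true] at hpre
  set R := L.dropWhile pvNotBegins with hR
  have hshape := pv_groups_shape L.length L (le_refl _)
  rw [← hR] at hshape
  -- A side
  rw [pv_shifts_groups L, ← hR]
  have hA : (pvGroups R).foldl pvInner PySem.Dict.empty =
      (pvGroups R).foldl pvShiftRun PySem.Dict.empty := by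
    apply pv_foldl_congr
    intro sh hsh acc
    obtain ⟨g, body, rfl, _, _⟩ := hshape sh hsh
    have hok := hpre _ hsh
    simp only [pvShiftOK, Bool.and_eq_true] at hok
    have heven := pv_bodyOK_even body hok.2
    exact pv_inner_eq (body.length / 2) body (by omega) g acc
  rw [hA]
  -- B side
  have hsplit : L = L.takeWhile pvNotBegins ++ R := (List.takeWhile_append_dropWhile).symm
  conv_rhs => rw [hsplit]
  rw [List.foldl_append]
  rw [pv_b_prefix (L.takeWhile pvNotBegins) PySem.Dict.empty none
    (fun s hs => by simpa [pvNotBegins] using List.mem_takeWhile_imp hs)]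
  have hflat : R = (pvGroups R).flatten := (pv_groups_flatten R.length R (le_refl _)).symm
  conv_rhs => rw [hflat]
  obtain ⟨g1, hB⟩ := pv_b_groups (pvGroups R) PySem.Dict.empty none
    (fun sh hsh => by
      obtain ⟨g, body, rfl, hb, hnb⟩ := hshape sh hsh
      have hok := hpre _ hsh
      simp only [pvShiftOK, Bool.and_eq_true] at hok
      exact ⟨g, body, rfl, hb, hnb, pv_bodyOK_even body hok.2⟩)
  rw [hB]

-- ===== VERDICT (by name: the statement is the Claim_ definition above) =====
theorem generate_guard_to_shift_spec : Claim_equal_generate_guard_to_shift := by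
  intro logs _ hpre
  unfold Spec_generate_guard_to_shift
  exact pv_main logs hpre
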